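-- pv_equiv track=rewrite | github.com/hummbl-dev/hummbl-governance | mcp_compliance.py | _map_entries_to_soc2
-- ===== SOURCE A (Python) =====
-- SOC2_CRITERIA = {
--     "Security": {
--         "CC1": "Control Environment",
--         "CC2": "Communication and Information",
--         "CC3": "Risk Assessment",
--         "CC4": "Monitoring Activities",
--         "CC5": "Control Activities",
--         "CC6": "Logical and Physical Access Controls",
--         "CC7": "System Operations",
--         "CC8": "Change Management",
--         "CC9": "Risk Mitigation",
--     },
--     "Availability": {
--         "A1": "Availability Commitments and System Requirements",
--     },
--     "Processing Integrity": {
--         "PI1": "Processing Integrity Commitments and System Requirements",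
--     },
--     "Confidentiality": {
--         "C1": "Confidentiality Commitments and System Requirements",
--     },
--     "Privacy": {
--         "P1": "Privacy Commitments and System Requirements",
--     },
-- }
--
-- _TUPLE_TO_SOC2 = {
--     "DCT": ["CC6.1", "CC6.3"],
--     "DCTX": ["CC6.1", "CC7.2"],
--     "CONTRACT": ["CC1.1", "CC5.1"],
--     "INTENT": ["CC3.1", "CC3.2"],
--     "EVIDENCE": ["CC4.1", "CC7.2"],
--     "ATTEST": ["CC4.1", "CC4.2"],
--     "CIRCUIT_BREAKER": ["CC7.2", "CC9.1", "A1.1"],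
--     "KILLSWITCH": ["CC7.2", "CC9.1", "A1.1"],
--     "SYSTEM": ["CC7.2"],
-- }
--
-- def _map_entries_to_soc2(entries):
--     """Map governance entries to SOC 2 criteria evidence."""
--     criteria_evidence: dict[str, dict[str, list]] = {}
--     for category, criteria in SOC2_CRITERIA.items():
--         criteria_evidence[category] = {crit_id: [] for crit_id in criteria}
--
--     for entry in entries:
--         tuple_type = entry.get("tuple_type", "")
--         base = {
--             "entry_id": entry.get("entry_id"),
--             "timestamp": entry.get("timestamp"),
--             "tuple_type": tuple_type,
--         }
--         for soc2_ctrl in _TUPLE_TO_SOC2.get(tuple_type, []):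
--             ctrl_prefix = soc2_ctrl.split(".")[0]
--             for category, criteria in SOC2_CRITERIA.items():
--                 if ctrl_prefix in criteria:
--                     if ctrl_prefix not in criteria_evidence[category]:
--                         criteria_evidence[category][ctrl_prefix] = []
--                     criteria_evidence[category][ctrl_prefix].append(base.copy())
--     return criteria_evidence
-- ===== SOURCE B (Python) =====
-- SOC2_CRITERIA = {
--     "Security": {
--         "CC1": "Control Environment",
--         "CC2": "Communication and Information",
--         "CC3": "Risk Assessment",
--         "CC4": "Monitoring Activities",
--         "CC5": "Control Activities",
--         "CC6": "Logical and Physical Access Controls",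
--         "CC7": "System Operations",
--         "CC8": "Change Management",
--         "CC9": "Risk Mitigation",
--     },
--     "Availability": {
--         "A1": "Availability Commitments and System Requirements",
--     },
--     "Processing Integrity": {
--         "PI1": "Processing Integrity Commitments and System Requirements",
--     },
--     "Confidentiality": {
--         "C1": "Confidentiality Commitments and System Requirements",
--     },
--     "Privacy": {
--         "P1": "Privacy Commitments and System Requirements",
--     },
-- }
--
-- _TUPLE_TO_SOC2 = {
--     "DCT": ["CC6.1", "CC6.3"],
--     "DCTX": ["CC6.1", "CC7.2"],
--     "CONTRACT": ["CC1.1", "CC5.1"],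
--     "INTENT": ["CC3.1", "CC3.2"],
--     "EVIDENCE": ["CC4.1", "CC7.2"],
--     "ATTEST": ["CC4.1", "CC4.2"],
--     "CIRCUIT_BREAKER": ["CC7.2", "CC9.1", "A1.1"],
--     "KILLSWITCH": ["CC7.2", "CC9.1", "A1.1"],
--     "SYSTEM": ["CC7.2"],
-- }
--
--
-- def _map_entries_to_soc2(entries):
--     """Map governance entries to SOC 2 criteria evidence."""
--
--     def evidence_for(prefix):
--         rows = []
--         for entry in entries:
--             tuple_type = entry.get("tuple_type", "")
--             for ctrl in _TUPLE_TO_SOC2.get(tuple_type, []):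
--                 if ctrl.split(".")[0] == prefix:
--                     rows.append({
--                         "entry_id": entry.get("entry_id"),
--                         "timestamp": entry.get("timestamp"),
--                         "tuple_type": tuple_type,
--                     })
--         return rows
--
--     return {
--         category: {crit_id: evidence_for(crit_id) for crit_id in criteria}
--         for category, criteria in SOC2_CRITERIA.items()
--     }
-- ===== Notes on version B (the rewrite author's own statement) =====
-- stated objective: simpler
-- what changed: B discards A's pre-initialised mutable nested dict and its per-control scan over all categories (with the dead missing-prefix re-init branch); instead it builds each criterion's evidence list directly and purely with one filtered pass over the entries per criterion, assembling the nested result as a comprehension.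
import Mathlib
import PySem

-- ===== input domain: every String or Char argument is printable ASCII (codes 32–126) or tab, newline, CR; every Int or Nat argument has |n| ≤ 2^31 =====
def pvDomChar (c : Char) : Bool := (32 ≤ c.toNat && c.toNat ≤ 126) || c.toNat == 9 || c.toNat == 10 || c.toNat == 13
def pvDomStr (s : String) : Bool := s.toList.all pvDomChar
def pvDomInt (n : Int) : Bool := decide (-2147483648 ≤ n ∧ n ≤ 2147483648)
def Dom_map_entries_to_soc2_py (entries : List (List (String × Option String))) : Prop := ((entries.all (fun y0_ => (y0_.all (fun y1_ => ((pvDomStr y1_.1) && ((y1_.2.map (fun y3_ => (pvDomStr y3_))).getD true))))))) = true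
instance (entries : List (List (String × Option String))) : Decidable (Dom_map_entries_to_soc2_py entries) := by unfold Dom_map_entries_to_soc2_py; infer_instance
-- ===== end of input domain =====

-- B replaces A's mutable nested dict (pre-initialised and updated by a per-control scan over all
-- categories) by a pure per-criterion construction: each criterion's evidence list is computed
-- directly by one filtered pass over the entries (objective: simpler; no speed claim).

-- shared module-level constant _TUPLE_TO_SOC2 and the semantics of entry.get(k, dflt)
def pvTupleToSoc2 : PySem.Dict String (List String) :=
  PySem.Dict.mk
    [("DCT", ["CC6.1", "CC6.3"]), ("DCTX", ["CC6.1", "CC7.2"]),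
     ("CONTRACT", ["CC1.1", "CC5.1"]), ("INTENT", ["CC3.1", "CC3.2"]),
     ("EVIDENCE", ["CC4.1", "CC7.2"]), ("ATTEST", ["CC4.1", "CC4.2"]),
     ("CIRCUIT_BREAKER", ["CC7.2", "CC9.1", "A1.1"]),
     ("KILLSWITCH", ["CC7.2", "CC9.1", "A1.1"]), ("SYSTEM", ["CC7.2"])]

def pvGet (entry : List (String × Option String)) (k : String) (dflt : Option String) : Option String :=
  (PySem.Dict.mk entry).getD k dflt

-- ===== PORT A =====
-- SOC2_CRITERIA (A iterates its items; the description values are carried but never read into the result)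
def pvSoc2Criteria : List (String × List (String × String)) :=
  [("Security",
     [("CC1", "Control Environment"), ("CC2", "Communication and Information"),
      ("CC3", "Risk Assessment"), ("CC4", "Monitoring Activities"),
      ("CC5", "Control Activities"), ("CC6", "Logical and Physical Access Controls"),
      ("CC7", "System Operations"), ("CC8", "Change Management"), ("CC9", "Risk Mitigation")]),
   ("Availability", [("A1", "Availability Commitments and System Requirements")]),
   ("Processing Integrity", [("PI1", "Processing Integrity Commitments and System Requirements")]),
   ("Confidentiality", [("C1", "Confidentiality Commitments and System Requirements")]),
   ("Privacy", [("P1", "Privacy Commitments and System Requirements")])]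

-- tuple_type = entry.get("tuple_type", ""): the stored value (possibly None) or the default ""
def pvTupleType (entry : List (String × Option String)) : Option String :=
  pvGet entry "tuple_type" (some "")

-- base = {"entry_id": …, "timestamp": …, "tuple_type": tuple_type}
def pvBase (entry : List (String × Option String)) : List (String × Option String) :=
  [("entry_id", pvGet entry "entry_id" none),
   ("timestamp", pvGet entry "timestamp" none),
   ("tuple_type", pvTupleType entry)]

-- _TUPLE_TO_SOC2.get(tuple_type, []): a None tuple_type matches no string key
def pvCtrls (entry : List (String × Option String)) : List String :=
  match pvTupleType entry with
  | none => []
  | some t => pvTupleToSoc2.getD t []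

-- soc2_ctrl.split(".")[0]: split never returns an empty list, so headD is exact
def pvPrefix (ctrl : String) : String :=
  (((PySem.Str.split? ctrl ".").getD []).headD "")

-- the inner 'for category, criteria in SOC2_CRITERIA.items(): …' body
def pvA_stepCat (p : String) (base : List (String × Option String))
    (ce : PySem.Dict String (PySem.Dict String (List (List (String × Option String)))))
    (cc : String × List (String × String)) :
    PySem.Dict String (PySem.Dict String (List (List (String × Option String)))) :=
  if (PySem.Dict.mk cc.2).contains p then
    let inner := ce.getD cc.1 PySem.Dict.empty   -- criteria_evidence[category]; key always present
    let inner := if inner.contains p then inner else inner.insert p []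
    ce.insert cc.1 (inner.insert p (inner.getD p [] ++ [base]))
  else ce

-- the 'for soc2_ctrl in _TUPLE_TO_SOC2.get(tuple_type, []): …' body
def pvA_stepCtrl (base : List (String × Option String))
    (ce : PySem.Dict String (PySem.Dict String (List (List (String × Option String)))))
    (ctrl : String) :
    PySem.Dict String (PySem.Dict String (List (List (String × Option String)))) :=
  pvSoc2Criteria.foldl (pvA_stepCat (pvPrefix ctrl) base) ce

-- the 'for entry in entries: …' body
def pvA_stepEntry
    (ce : PySem.Dict String (PySem.Dict String (List (List (String × Option String)))))
    (entry : List (String × Option String)) :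
    PySem.Dict String (PySem.Dict String (List (List (String × Option String)))) :=
  (pvCtrls entry).foldl (pvA_stepCtrl (pvBase entry)) ce

def map_entries_to_soc2_py (entries : List (List (String × Option String))) : List (String × List (String × List (List (String × Option String)))) :=
  (entries.foldl pvA_stepEntry
    (pvSoc2Criteria.foldl
      (fun ce cc => ce.insert cc.1
        (PySem.Dict.mk (cc.2.map (fun kv => (kv.1, ([] : List (List (String × Option String))))))))
      PySem.Dict.empty)).items.map (fun cd => (cd.1, cd.2.items))

-- ===== PORT B =====
-- Source B iterates SOC2_CRITERIA only for its category names and criterion ids (the result never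
-- contains the descriptions), so B's port carries exactly that data
def pvB_criteriaIds : List (String × List String) :=
  [("Security", ["CC1", "CC2", "CC3", "CC4", "CC5", "CC6", "CC7", "CC8", "CC9"]),
   ("Availability", ["A1"]),
   ("Processing Integrity", ["PI1"]),
   ("Confidentiality", ["C1"]),
   ("Privacy", ["P1"])]

-- evidence_for(pfx): one filtered pass over the entries, appending a fresh base row per hit
def pvB_evidenceFor (entries : List (List (String × Option String))) (pfx : String) :
    List (List (String × Option String)) :=
  entries.flatMap (fun entry =>
    (pvCtrls entry).filter
        (fun ctrl => (((PySem.Str.split? ctrl ".").getD []).headD "") == pfx)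
      |>.map (fun _ => pvBase entry))

def map_entries_to_soc2_py_alt (entries : List (List (String × Option String))) : List (String × List (String × List (List (String × Option String)))) :=
  pvB_criteriaIds.map (fun cc =>
    (cc.1, cc.2.map (fun crit_id => (crit_id, pvB_evidenceFor entries crit_id))))

-- ===== PRECONDITION & SPEC =====
def Spec_map_entries_to_soc2_py (entries : List (List (String × Option String))) (out : List (String × List (String × List (List (String × Option String))))) : Prop := out = map_entries_to_soc2_py_alt entries
instance (entries : List (List (String × Option String))) (out : List (String × List (String × List (List (String × Option String))))) : Decidable (Spec_map_entries_to_soc2_py entries out) := by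
  unfold Spec_map_entries_to_soc2_py
  haveI : DecidableEq (List (String × List (List (String × Option String)))) := inferInstance
  infer_instance

-- ===== CLAIM (what is proved, stated in full; the proofs are below) =====
def Claim_equal_map_entries_to_soc2_py : Prop := ∀ (entries : List (List (String × Option String))), Dom_map_entries_to_soc2_py entries → Spec_map_entries_to_soc2_py entries (map_entries_to_soc2_py entries)

-- ===== LEMMAS AND PROOFS =====

-- proof-only intermediate: a flat prefix → evidence accumulator (neither port computes this)
def pvBk_step (b : PySem.Dict String (List (List (String × Option String))))
    (entry : List (String × Option String)) :
    PySem.Dict String (List (List (String × Option String))) :=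
  (pvCtrls entry).foldl
    (fun b ctrl => b.modify (pvPrefix ctrl) [] (· ++ [pvBase entry])) b

-- A's nested state, expressed as a function of the flat accumulator
def pvCeOf (b : PySem.Dict String (List (List (String × Option String)))) :
    PySem.Dict String (PySem.Dict String (List (List (String × Option String)))) :=
  PySem.Dict.mk (pvSoc2Criteria.map (fun cc =>
    (cc.1, PySem.Dict.mk (cc.2.map (fun kv => (kv.1, b.getD kv.1 []))))))

theorem pvCeOf_empty :
    pvSoc2Criteria.foldl
      (fun ce cc => ce.insert cc.1
        (PySem.Dict.mk (cc.2.map (fun kv => (kv.1, ([] : List (List (String × Option String))))))))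
      PySem.Dict.empty = pvCeOf PySem.Dict.empty := by
  decide

-- PySem.Dict.getD_modify, restated in the unfolded form simp produces
theorem pv_find_modify (b : PySem.Dict String (List (List (String × Option String))))
    (k c : String) (f : List (List (String × Option String)) → List (List (String × Option String))) :
    (Option.map (fun x => x.2) (List.find? (fun p => p.1 == c) ((b.modify k [] f).items))).getD []
      = if c = k then f ((Option.map (fun x => x.2) (List.find? (fun p => p.1 == k) b.items)).getD [])
        else (Option.map (fun x => x.2) (List.find? (fun p => p.1 == c) b.items)).getD [] := by
  have h := PySem.Dict.getD_modify (d := b) (k := k) (k' := c) (d0 := []) (f := f)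
  simpa [PySem.Dict.getD, PySem.Dict.get?] using h

theorem pvStepCat_lemma (p : String) (base : List (String × Option String))
    (b : PySem.Dict String (List (List (String × Option String)))) :
    pvSoc2Criteria.foldl (pvA_stepCat p base) (pvCeOf b)
      = pvCeOf (b.modify p [] (· ++ [base])) := by
  by_cases h1 : p = "CC1"
  · subst h1
    simp [pvSoc2Criteria, pvA_stepCat, pvCeOf, List.foldl, pv_find_modify,
          PySem.Dict.getD, PySem.Dict.get?, PySem.Dict.contains, PySem.Dict.insert,
          PySem.Dict.empty]
  by_cases h2 : p = "CC2"
  · subst h2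
    simp [pvSoc2Criteria, pvA_stepCat, pvCeOf, List.foldl, pv_find_modify,
          PySem.Dict.getD, PySem.Dict.get?, PySem.Dict.contains, PySem.Dict.insert,
          PySem.Dict.empty]
  by_cases h3 : p = "CC3"
  · subst h3
    simp [pvSoc2Criteria, pvA_stepCat, pvCeOf, List.foldl, pv_find_modify,
          PySem.Dict.getD, PySem.Dict.get?, PySem.Dict.contains, PySem.Dict.insert,
          PySem.Dict.empty]
  by_cases h4 : p = "CC4"
  · subst h4
    simp [pvSoc2Criteria, pvA_stepCat, pvCeOf, List.foldl, pv_find_modify,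
          PySem.Dict.getD, PySem.Dict.get?, PySem.Dict.contains, PySem.Dict.insert,
          PySem.Dict.empty]
  by_cases h5 : p = "CC5"
  · subst h5
    simp [pvSoc2Criteria, pvA_stepCat, pvCeOf, List.foldl, pv_find_modify,
          PySem.Dict.getD, PySem.Dict.get?, PySem.Dict.contains, PySem.Dict.insert,
          PySem.Dict.empty]
  by_cases h6 : p = "CC6"
  · subst h6
    simp [pvSoc2Criteria, pvA_stepCat, pvCeOf, List.foldl, pv_find_modify,
          PySem.Dict.getD, PySem.Dict.get?, PySem.Dict.contains, PySem.Dict.insert,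
          PySem.Dict.empty]
  by_cases h7 : p = "CC7"
  · subst h7
    simp [pvSoc2Criteria, pvA_stepCat, pvCeOf, List.foldl, pv_find_modify,
          PySem.Dict.getD, PySem.Dict.get?, PySem.Dict.contains, PySem.Dict.insert,
          PySem.Dict.empty]
  by_cases h8 : p = "CC8"
  · subst h8
    simp [pvSoc2Criteria, pvA_stepCat, pvCeOf, List.foldl, pv_find_modify,
          PySem.Dict.getD, PySem.Dict.get?, PySem.Dict.contains, PySem.Dict.insert,
          PySem.Dict.empty]
  by_cases h9 : p = "CC9"
  · subst h9
    simp [pvSoc2Criteria, pvA_stepCat, pvCeOf, List.foldl, pv_find_modify,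
          PySem.Dict.getD, PySem.Dict.get?, PySem.Dict.contains, PySem.Dict.insert,
          PySem.Dict.empty]
  by_cases h10 : p = "A1"
  · subst h10
    simp [pvSoc2Criteria, pvA_stepCat, pvCeOf, List.foldl, pv_find_modify,
          PySem.Dict.getD, PySem.Dict.get?, PySem.Dict.contains, PySem.Dict.insert,
          PySem.Dict.empty]
  by_cases h11 : p = "PI1"
  · subst h11
    simp [pvSoc2Criteria, pvA_stepCat, pvCeOf, List.foldl, pv_find_modify,
          PySem.Dict.getD, PySem.Dict.get?, PySem.Dict.contains, PySem.Dict.insert,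
          PySem.Dict.empty]
  by_cases h12 : p = "C1"
  · subst h12
    simp [pvSoc2Criteria, pvA_stepCat, pvCeOf, List.foldl, pv_find_modify,
          PySem.Dict.getD, PySem.Dict.get?, PySem.Dict.contains, PySem.Dict.insert,
          PySem.Dict.empty]
  by_cases h13 : p = "P1"
  · subst h13
    simp [pvSoc2Criteria, pvA_stepCat, pvCeOf, List.foldl, pv_find_modify,
          PySem.Dict.getD, PySem.Dict.get?, PySem.Dict.contains, PySem.Dict.insert,
          PySem.Dict.empty]
  simp [pvSoc2Criteria, pvA_stepCat, pvCeOf, List.foldl, pv_find_modify,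
        PySem.Dict.getD, PySem.Dict.get?, PySem.Dict.contains,
        Ne.symm h1, Ne.symm h2, Ne.symm h3, Ne.symm h4, Ne.symm h5, Ne.symm h6, Ne.symm h7,
        Ne.symm h8, Ne.symm h9, Ne.symm h10, Ne.symm h11, Ne.symm h12, Ne.symm h13]

theorem pvStepCtrls_lemma (ctrls : List String) (base : List (String × Option String))
    (b : PySem.Dict String (List (List (String × Option String)))) :
    ctrls.foldl (pvA_stepCtrl base) (pvCeOf b)
      = pvCeOf (ctrls.foldl (fun b ctrl => b.modify (pvPrefix ctrl) [] (· ++ [base])) b) := by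
  induction ctrls generalizing b with
  | nil => rfl
  | cons c cs ih =>
      simp only [List.foldl_cons, pvA_stepCtrl, pvStepCat_lemma, ih]

theorem pvFold_lemma (entries : List (List (String × Option String)))
    (b : PySem.Dict String (List (List (String × Option String)))) :
    entries.foldl pvA_stepEntry (pvCeOf b)
      = pvCeOf (entries.foldl pvBk_step b) := by
  induction entries generalizing b with
  | nil => rfl
  | cons e es ih =>
      simp only [List.foldl_cons, pvA_stepEntry, pvBk_step, pvStepCtrls_lemma, ih]

-- the flat accumulator at key p IS B's per-criterion filtered pass (inner loop version)
theorem pvBk_ctrls_getD (ctrls : List String) (base : List (String × Option String))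
    (b : PySem.Dict String (List (List (String × Option String)))) (p : String) :
    (ctrls.foldl (fun b ctrl => b.modify (pvPrefix ctrl) [] (· ++ [base])) b).getD p []
      = b.getD p []
          ++ (ctrls.filter (fun ctrl => (((PySem.Str.split? ctrl ".").getD []).headD "") == p)).map
               (fun _ => base) := by
  induction ctrls generalizing b with
  | nil => simp
  | cons c cs ih =>
      rw [List.foldl_cons, ih, PySem.Dict.getD_modify, List.filter_cons]
      by_cases h : (((PySem.Str.split? c ".").getD []).head?.getD "") = p
      · simp [pvPrefix, h, List.append_assoc]
      · simp [pvPrefix, h, Ne.symm h]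

-- the flat accumulator at key p IS B's evidence_for p
theorem pvBk_getD (entries : List (List (String × Option String)))
    (b : PySem.Dict String (List (List (String × Option String)))) (p : String) :
    (entries.foldl pvBk_step b).getD p [] = b.getD p [] ++ pvB_evidenceFor entries p := by
  induction entries generalizing b with
  | nil => simp [pvB_evidenceFor]
  | cons e es ih =>
      rw [List.foldl_cons, ih, pvBk_step, pvBk_ctrls_getD]
      simp [pvB_evidenceFor, List.append_assoc]

-- ===== VERDICT (by name: the statement is the Claim_ definition above) =====
theorem map_entries_to_soc2_py_spec : Claim_equal_map_entries_to_soc2_py := by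
  intro entries _
  unfold Spec_map_entries_to_soc2_py map_entries_to_soc2_py map_entries_to_soc2_py_alt
  rw [pvCeOf_empty, pvFold_lemma]
  have hg : ∀ p, (entries.foldl pvBk_step PySem.Dict.empty).getD p []
      = pvB_evidenceFor entries p := by
    intro p
    rw [pvBk_getD]
    simp [PySem.Dict.getD, PySem.Dict.get?, PySem.Dict.empty]
  simp [pvCeOf, pvSoc2Criteria, pvB_criteriaIds, hg]
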